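-- pv_equiv track=rewrite | github.com/Nafine/INF-LABS | lab4/src/govnocode.py | parse_xml_to_json
-- ===== SOURCE A (Python) =====
-- def is_tag(token): return token[-1] == '>'
--
-- def is_closing_tag(token): return token[0] == '/'
--
-- def parse_xml_to_json(xml_data) -> str:
--     tokens = []
--     for line in xml_data.splitlines():
--         tokens += filter(lambda s: s != ' ', line.strip().replace('>', '><').split('<')[1:-1])
--
--     i,depth = 0, 1
--     s = '{\n'
--     while i < len(tokens):
--         if is_closing_tag(tokens[i]):
--             depth -= 1
--             s += '\t' * depth + '}'
--         elif i != len(tokens) - 1 and  is_tag(tokens[i]) and is_tag(tokens[i+1]):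
--             if not is_closing_tag(tokens[i]): s += '\t' * depth + f'"{tokens[i][:-1]}": ' + '{'
--             depth += 1
--         else:
--             s += '\t' * depth + f'"{tokens[i][:-1]}": "{tokens[i+1].strip()}"'
--             i += 2
--         s += ',\n' if (i < len(tokens) - 1 and is_closing_tag(tokens[i]) and not is_closing_tag(tokens[i+1])) else '\n'
--         i += 1
--     return s + '}'
-- ===== SOURCE B (Python) =====
-- # B: same tokenization, but a recursive-descent renderer (element/forest) instead of
-- # the flat index loop with a mutable depth counter; siblings are joined with ',\n'.
--
-- def is_tag(token): return token[-1] == '>'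
--
-- def is_closing_tag(token): return token[0] == '/'
--
-- def _element(ts, depth):
--     """Render the element at the head of ts; return (rendered chunk, remaining tokens)."""
--     name = ts[0][:-1]
--     if is_tag(ts[1]):
--         inner, rest = _forest(ts[1:], depth + 1)
--         body = '\t' * depth + f'"{name}": ' + '{'
--         if inner:
--             body += '\n' + ',\n'.join(inner)
--         return body + '\n' + '\t' * depth + '}', rest[1:]
--     else:
--         return '\t' * depth + f'"{name}": "{ts[1].strip()}"', ts[3:]
--
-- def _forest(ts, depth):
--     """Render a sequence of sibling elements until a closing tag (or the end)."""
--     chunks = []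
--     while ts and not is_closing_tag(ts[0]):
--         chunk, ts = _element(ts, depth)
--         chunks.append(chunk)
--     return chunks, ts
--
-- def parse_xml_to_json(xml_data) -> str:
--     tokens = []
--     for line in xml_data.splitlines():
--         tokens += [t for t in line.strip().replace('>', '><').split('<')[1:-1] if t != ' ']
--     chunks, _ = _forest(tokens, 1)
--     return '{\n' + (',\n'.join(chunks) + '\n' if chunks else '') + '}'
-- ===== Notes on version B (the rewrite author's own statement) =====
-- stated objective: alternative
-- what changed: Tokenization is kept identical, but A's flat index loop with a mutable depth counter and an idiosyncratic lookahead comma test is replaced by a recursive-descent renderer (element/forest mutual recursion) that renders each element as a chunk and joins sibling chunks with a comma-newline separator.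
-- outside the precondition, e.g. on parse_xml_to_json('</a>'): A returns '{\n}\n}', B returns '{\n}'
import Mathlib
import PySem

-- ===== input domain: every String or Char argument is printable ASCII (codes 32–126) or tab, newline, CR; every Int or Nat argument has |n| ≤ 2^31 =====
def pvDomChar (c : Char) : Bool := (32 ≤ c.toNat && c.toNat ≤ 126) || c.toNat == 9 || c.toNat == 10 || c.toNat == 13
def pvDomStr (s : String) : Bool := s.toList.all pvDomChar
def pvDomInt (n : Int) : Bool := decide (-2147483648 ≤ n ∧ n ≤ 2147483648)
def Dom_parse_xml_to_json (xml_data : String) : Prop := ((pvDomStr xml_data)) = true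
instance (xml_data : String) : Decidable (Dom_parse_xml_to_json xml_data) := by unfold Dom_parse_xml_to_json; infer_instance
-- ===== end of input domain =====

-- B replaces A's flat index loop (mutable depth counter, idiosyncratic comma test) by a
-- recursive-descent renderer over the same token list; objective: alternative decomposition.

-- ===== PORT A =====
-- Shared tokenization (identical in A and B): for each line,
--   line.strip().replace('>', '><').split('<')[1:-1]  filtered of tokens equal to ' '.
def pvTokens (xml_data : String) : List (List Char) :=
  (PySem.Chars.splitlines xml_data.toList).foldl
    (fun acc line =>
      acc ++ (PySem.List.slice
                (PySem.Chars.splitOn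
                  (PySem.Chars.replace (PySem.Chars.strip line) ['>'] ['>', '<']) ['<'])
                (some 1) (some (-1))).filter (fun t => t ≠ [' ']))
    []

-- is_tag(token): token[-1] == '>'  (Python raises IndexError on "", Pre_ excludes such tokens)
def pvIsTag (t : List Char) : Bool := PySem.List.pyGet? t (-1) == some '>'

-- is_closing_tag(token): token[0] == '/'  (same remark for "")
def pvIsClosing (t : List Char) : Bool := PySem.List.pyGet? t 0 == some '/'

-- '\t' * depth (Python: empty for depth ≤ 0)
def pvTabs (depth : Int) : List Char := List.replicate depth.toNat '\t'

-- A's separator: ',\n' if i < len(tokens)-1 and is_closing_tag(tokens[i]) and not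
-- is_closing_tag(tokens[i+1]) else '\n', expressed on the suffix r1 = tokens[i:].
def pvSep (r1 : List (List Char)) : List Char :=
  if 2 ≤ r1.length ∧ pvIsClosing (r1.headD []) = true ∧ pvIsClosing ((r1.drop 1).headD []) = false
  then [',', '\n'] else ['\n']

-- A's while loop, transliterated over the remaining suffix tokens[i:] with the same state
-- (depth, s) and the same branches in the same order; tokens[i+1] reads use headD [] where
-- Python would raise IndexError (excluded by Pre_).
def pvLoopA : List (List Char) → Int → List Char → List Char
  | [], _, s => s
  | t :: rest, depth, s =>
    if pvIsClosing t then
      let d' := depth - 1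
      pvLoopA rest d' (s ++ pvTabs d' ++ ['}'] ++ pvSep (t :: rest))
    else if rest ≠ [] ∧ pvIsTag t = true ∧ pvIsTag (rest.headD []) = true then
      let s' := if ¬ pvIsClosing t then
          s ++ pvTabs depth ++ ['"'] ++ PySem.List.slice t none (some (-1)) ++ ['"', ':', ' ', '{']
        else s
      pvLoopA rest (depth + 1) (s' ++ pvSep (t :: rest))
    else
      let x := rest.headD []
      let s' := s ++ pvTabs depth ++ ['"'] ++ PySem.List.slice t none (some (-1)) ++
                ['"', ':', ' ', '"'] ++ PySem.Chars.strip x ++ ['"']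
      pvLoopA (rest.drop 2) depth (s' ++ pvSep (rest.drop 1))
  termination_by ts _ _ => ts.length
  decreasing_by all_goals (simp; try omega)

def parse_xml_to_json (xml_data : String) : String :=
  String.ofList (pvLoopA (pvTokens xml_data) 1 ['{', '\n'] ++ ['}'])

-- ===== PORT B =====
-- B's recursive descent: _element renders the element at the head of ts and returns the
-- rest; _forest renders siblings until a closing tag (or the end) and joins them with ',\n'.
-- fuel is a totality guard only (the recursion consumes the list); ts[1] reads use headD []
-- where Python would raise IndexError (excluded by Pre_).
mutual
def pvElemB (fuel : Nat) (ts : List (List Char)) (depth : Int) : List Char × List (List Char) :=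
  match fuel with
  | 0 => ([], [])
  | fuel + 1 =>
    let name := PySem.List.slice (ts.headD []) none (some (-1))
    let x := (ts.drop 1).headD []
    if pvIsTag x then
      let p := pvForestB fuel (ts.drop 1) (depth + 1)
      let body := pvTabs depth ++ ['"'] ++ name ++ ['"', ':', ' ', '{']
      let body := if p.1 ≠ [] then body ++ ['\n'] ++ PySem.Chars.join [',', '\n'] p.1 else body
      (body ++ ['\n'] ++ pvTabs depth ++ ['}'], p.2.drop 1)
    else
      (pvTabs depth ++ ['"'] ++ name ++ ['"', ':', ' ', '"'] ++ PySem.Chars.strip x ++ ['"'],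
       ts.drop 3)
  termination_by (fuel, 0)

def pvForestB (fuel : Nat) (ts : List (List Char)) (depth : Int) :
    List (List Char) × List (List Char) :=
  match fuel, ts with
  | _, [] => ([], [])
  | 0, _ => ([], ts)
  | fuel + 1, t :: rest =>
    if pvIsClosing t then ([], t :: rest)
    else
      let e := pvElemB (fuel + 1) (t :: rest) depth
      let f := pvForestB fuel e.2 depth
      (e.1 :: f.1, f.2)
  termination_by (fuel, 1)
end

def parse_xml_to_json_alt (xml_data : String) : String :=
  let ts := pvTokens xml_data
  let p := pvForestB (ts.length + 1) ts 1
  String.ofList (['{', '\n'] ++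
    (if p.1 ≠ [] then PySem.Chars.join [',', '\n'] p.1 ++ ['\n'] else []) ++ ['}'])

-- ===== PRECONDITION & SPEC =====
-- Well-formedness grammar of the token stream, decided by one linear scan with a nesting
-- counter d: a stream is accepted iff it is a balanced forest of elements, where an element
-- is either  open (elements…) close  or the leaf  open text close.
def pvCheck : List (List Char) → Nat → Bool
  | [], d => d == 0
  | t :: rest, d =>
    if pvIsClosing t then
      pvIsTag t && d != 0 && pvCheck rest (d - 1)
    else if pvIsTag t then
      match rest with
      | [] => false
      | x :: rest2 =>
        if pvIsTag x then pvCheck (x :: rest2) (d + 1)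
        else
          match rest2 with
          | c :: rest3 => x != [] && pvIsTag c && pvIsClosing c && pvCheck rest3 d
          | [] => false
    else false

-- Pre_ admits exactly the inputs whose token stream is a well-formed forest (balanced tags,
-- every text enclosed in an open/closing pair). Outside it A either raises IndexError on a
-- malformed token, or returns output whose comma placement and brace skipping are accidents
-- of A's index arithmetic on malformed XML (see claim.json cites).
def Pre_parse_xml_to_json (xml_data : String) : Prop := pvCheck (pvTokens xml_data) 0 = true
instance (xml_data : String) : Decidable (Pre_parse_xml_to_json xml_data) := by
  unfold Pre_parse_xml_to_json; infer_instance

def pvWitness_parse_xml_to_json : String := "<a>x</a>"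

def Spec_parse_xml_to_json (xml_data : String) (out : String) : Prop :=
  out = parse_xml_to_json_alt xml_data
instance (xml_data : String) (out : String) : Decidable (Spec_parse_xml_to_json xml_data out) := by
  unfold Spec_parse_xml_to_json; infer_instance

-- ===== CLAIM (what is proved, stated in full; the proofs are below) =====
def Claim_equal_parse_xml_to_json : Prop := ∀ (xml_data : String), Dom_parse_xml_to_json xml_data → Pre_parse_xml_to_json xml_data → Spec_parse_xml_to_json xml_data (parse_xml_to_json xml_data)

-- ===== LEMMAS AND PROOFS =====

-- Token-shape predicates: an opening tag, a closing tag, a text token.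
def pvOpenTok (t : List Char) : Prop := pvIsTag t = true ∧ pvIsClosing t = false
def pvCloseTok (t : List Char) : Prop := pvIsTag t = true ∧ pvIsClosing t = true
def pvTextTok (t : List Char) : Prop := t ≠ [] ∧ pvIsTag t = false


-- Parse trees of the token grammar (explicit mutual pair; tokens are stored verbatim).
mutual
inductive PvTree : Type
  | leaf : List Char → List Char → List Char → PvTree
  | node : List Char → PvForest → List Char → PvTree
inductive PvForest : Type
  | nil : PvForest
  | cons : PvTree → PvForest → PvForest
end

mutual
def pvOkE : PvTree → Prop
  | .leaf o x c => pvOpenTok o ∧ pvTextTok x ∧ pvCloseTok c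
  | .node o f c => pvOpenTok o ∧ pvOkF f ∧ pvCloseTok c
def pvOkF : PvForest → Prop
  | .nil => True
  | .cons e f => pvOkE e ∧ pvOkF f
end

mutual
def pvFlatE : PvTree → List (List Char)
  | .leaf o x c => [o, x, c]
  | .node o f c => o :: (pvFlatF f ++ [c])
def pvFlatF : PvForest → List (List Char)
  | .nil => []
  | .cons e f => pvFlatE e ++ pvFlatF f
end

mutual
def pvRenderE : PvTree → Int → List Char
  | .leaf o x _, d =>
      pvTabs d ++ ['"'] ++ o.dropLast ++ ['"', ':', ' ', '"'] ++ PySem.Chars.strip x ++ ['"']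
  | .node o f _, d =>
      pvTabs d ++ ['"'] ++ o.dropLast ++ ['"', ':', ' ', '{'] ++
      (if pvRenderF f (d + 1) ≠ [] then ['\n'] ++ PySem.Chars.join [',', '\n'] (pvRenderF f (d + 1)) else []) ++
      ['\n'] ++ pvTabs d ++ ['}']
def pvRenderF : PvForest → Int → List (List Char)
  | .nil, _ => []
  | .cons e f, d => pvRenderE e d :: pvRenderF f d
end

def pvBodyF (f : PvForest) (d : Int) : List Char :=
  if pvRenderF f d = [] then [] else PySem.Chars.join [',', '\n'] (pvRenderF f d) ++ ['\n']

def pvGood (r : List (List Char)) : Prop := r = [] ∨ pvIsClosing (r.headD []) = true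

-- A's separator as a function of what FOLLOWS the closing token of an element
def pvSepR (r : List (List Char)) : List Char :=
  if r ≠ [] ∧ pvIsClosing (r.headD []) = false then [',', '\n'] else ['\n']

-- small facts about tokens and flattened trees
theorem pvSep_cons_closing {c : List Char} {R : List (List Char)}
    (h : pvIsClosing c = true) : pvSep (c :: R) = pvSepR R := by
  cases R with
  | nil => simp [pvSep, pvSepR]
  | cons r rs =>
    by_cases hr : pvIsClosing r = true <;> simp [pvSep, pvSepR, h, hr]

theorem pvSep_cons_open {t : List Char} {R : List (List Char)}
    (h : pvIsClosing t = false) : pvSep (t :: R) = ['\n'] := by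
  simp [pvSep, h]

theorem pvSepR_good {R : List (List Char)} (h : pvGood R) : pvSepR R = ['\n'] := by
  have hne : ¬(R ≠ [] ∧ pvIsClosing (R.headD []) = false) := by
    rcases h with h | h
    · rintro ⟨hn, -⟩; exact hn h
    · rintro ⟨-, hf⟩; rw [h] at hf; cases hf
  simp only [pvSepR]; rw [if_neg hne]

theorem pvSepR_open_cons {t : List Char} {R : List (List Char)}
    (h : pvIsClosing t = false) : pvSepR (t :: R) = [',', '\n'] := by
  simp [pvSepR, h]

theorem pvFlatE_cons_open (e : PvTree) (h : pvOkE e) :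
    ∃ o l, pvFlatE e = o :: l ∧ pvOpenTok o := by
  cases e with
  | leaf o x c => exact ⟨o, [x, c], rfl, h.1⟩
  | node o f c => exact ⟨o, pvFlatF f ++ [c], rfl, h.1⟩

theorem pvFlatE_length (e : PvTree) : 2 ≤ (pvFlatE e).length := by
  cases e with
  | leaf o x c => simp [pvFlatE]
  | node o f c => simp [pvFlatE]

theorem pvHead_tag {f : PvForest} {c : List Char} {R : List (List Char)}
    (hf : pvOkF f) (hc : pvCloseTok c) :
    pvIsTag ((pvFlatF f ++ c :: R).headD []) = true := by
  cases f with
  | nil => simpa [pvFlatF] using hc.1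
  | cons e f' =>
    obtain ⟨o, l, heq, ho⟩ := pvFlatE_cons_open e hf.1
    simp [pvFlatF, heq, ho.1]

-- one unfolding step of A's loop on a nonempty suffix
theorem pvLoopA_cons (t : List Char) (rest : List (List Char)) (depth : Int) (s : List Char) :
    pvLoopA (t :: rest) depth s =
      if pvIsClosing t then
        pvLoopA rest (depth - 1) (s ++ pvTabs (depth - 1) ++ ['}'] ++ pvSep (t :: rest))
      else if rest ≠ [] ∧ pvIsTag t = true ∧ pvIsTag (rest.headD []) = true then
        pvLoopA rest (depth + 1)
          ((if ¬ pvIsClosing t then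
              s ++ pvTabs depth ++ ['"'] ++ PySem.List.slice t none (some (-1)) ++
                ['"', ':', ' ', '{']
            else s) ++ pvSep (t :: rest))
      else
        pvLoopA (rest.drop 2) depth
          ((s ++ pvTabs depth ++ ['"'] ++ PySem.List.slice t none (some (-1)) ++
            ['"', ':', ' ', '"'] ++ PySem.Chars.strip (rest.headD []) ++ ['"']) ++
            pvSep (rest.drop 1)) := by
  rw [pvLoopA.eq_def]

-- parsing: a checked stream decomposes as a forest followed by the pending closings
theorem pvCheck_parses :
    ∀ n ts, ts.length ≤ n → ∀ d : Nat, pvCheck ts d = true →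
      ∃ (f : PvForest) (rest : List (List Char)), pvOkF f ∧ ts = pvFlatF f ++ rest ∧
        (if d = 0 then rest = []
         else ∃ c rest', rest = c :: rest' ∧ pvCloseTok c ∧ pvCheck rest' (d - 1) = true) := by
  intro n
  induction n using Nat.strong_induction_on with
  | _ n IH =>
  intro ts hlen d hck
  match ts with
  | [] =>
    refine ⟨.nil, [], trivial, by simp [pvFlatF], ?_⟩
    simp [pvCheck] at hck
    simp [hck]
  | t :: rest =>
    cases hcl : pvIsClosing t with
    | true =>
      rw [pvCheck.eq_def] at hck
      simp only [hcl, if_pos, Bool.and_eq_true, bne_iff_ne] at hck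
      obtain ⟨⟨htag, hd⟩, hck'⟩ := hck
      refine ⟨.nil, t :: rest, trivial, by simp [pvFlatF], ?_⟩
      rw [if_neg hd]
      exact ⟨t, rest, rfl, ⟨htag, hcl⟩, hck'⟩
    | false =>
      cases htag : pvIsTag t with
      | false => rw [pvCheck.eq_def] at hck; simp [hcl, htag] at hck
      | true =>
        match rest with
        | [] => rw [pvCheck.eq_def] at hck; simp [hcl, htag] at hck
        | x :: rest2 =>
          cases hx : pvIsTag x with
          | true =>
            -- container element
            rw [pvCheck.eq_def] at hck
            simp only [hcl, htag, hx, Bool.false_eq_true, if_false, if_true] at hck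
            have hlen1 : (x :: rest2).length < n := by
              simp only [List.length_cons] at hlen ⊢; omega
            obtain ⟨f1, r1, hok1, heq1, hrest1⟩ :=
              IH (x :: rest2).length hlen1 (x :: rest2) le_rfl (d + 1) hck
            rw [if_neg (by omega)] at hrest1
            obtain ⟨c, r2, hr1, hcTok, hck2⟩ := hrest1
            have hlen2 : r2.length < n := by
              have := congrArg List.length heq1
              simp only [hr1, List.length_cons, List.length_append] at this
              simp only [List.length_cons] at hlen; omega
            obtain ⟨f2, r3, hok2, heq2, hrest2⟩ :=
              IH r2.length hlen2 r2 le_rfl d (by simpa using hck2)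
            refine ⟨.cons (.node t f1 c) f2, r3, ?_, ?_, hrest2⟩
            · simp only [pvOkF, pvOkE, pvOpenTok]
              exact ⟨⟨⟨htag, hcl⟩, hok1, hcTok⟩, hok2⟩
            · simp only [pvFlatF, pvFlatE, heq1, hr1, heq2, List.append_assoc, List.cons_append,
                List.nil_append]
          | false =>
            -- leaf element
            match rest2 with
            | [] => rw [pvCheck.eq_def] at hck; simp [hcl, htag, hx] at hck
            | c :: rest3 =>
              rw [pvCheck.eq_def] at hck
              simp only [hcl, htag, hx, Bool.false_eq_true, if_false, if_true,
                Bool.and_eq_true, bne_iff_ne] at hck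
              obtain ⟨⟨⟨hxne, hctag⟩, hccl⟩, hck3⟩ := hck
              have hlen3 : rest3.length < n := by
                simp only [List.length_cons] at hlen; omega
              obtain ⟨f2, r3, hok2, heq2, hrest2⟩ := IH rest3.length hlen3 rest3 le_rfl d hck3
              refine ⟨.cons (.leaf t x c) f2, r3, ?_, ?_, hrest2⟩
              · simp only [pvOkF, pvOkE, pvOpenTok, pvTextTok, pvCloseTok]
                exact ⟨⟨⟨htag, hcl⟩, ⟨hxne, hx⟩, ⟨hctag, hccl⟩⟩, hok2⟩
              · simp only [pvFlatF, pvFlatE, heq2, List.cons_append,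
                  List.nil_append]

-- the four render lemmas, proved together by strong induction on the flattened length
theorem pvMain :
    ∀ n : Nat,
      (∀ e, pvOkE e → (pvFlatE e).length ≤ n →
        (∀ R depth fuel, (pvFlatE e).length ≤ fuel →
            pvElemB fuel (pvFlatE e ++ R) depth = (pvRenderE e depth, R)) ∧
        (∀ R depth s, pvLoopA (pvFlatE e ++ R) depth s =
            pvLoopA R depth (s ++ pvRenderE e depth ++ pvSepR R))) ∧
      (∀ f, pvOkF f → (pvFlatF f).length ≤ n →
        (∀ R depth fuel, pvGood R → (pvFlatF f).length < fuel →
            pvForestB fuel (pvFlatF f ++ R) depth = (pvRenderF f depth, R)) ∧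
        (∀ R depth s, pvGood R → pvLoopA (pvFlatF f ++ R) depth s =
            pvLoopA R depth (s ++ pvBodyF f depth))) := by
  intro n
  induction n using Nat.strong_induction_on with
  | _ n IH =>
  have helem : ∀ e, pvOkE e → (pvFlatE e).length ≤ n →
      (∀ R depth fuel, (pvFlatE e).length ≤ fuel →
          pvElemB fuel (pvFlatE e ++ R) depth = (pvRenderE e depth, R)) ∧
      (∀ R depth s, pvLoopA (pvFlatE e ++ R) depth s =
          pvLoopA R depth (s ++ pvRenderE e depth ++ pvSepR R)) := by
    intro e hok hlen
    cases e with
    | leaf o x c =>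
      obtain ⟨ho, hx, hc⟩ : pvOpenTok o ∧ pvTextTok x ∧ pvCloseTok c := hok
      constructor
      · intro R depth fuel hfuel
        simp only [pvFlatE, List.length_cons] at hfuel
        match fuel with
        | fuel + 1 =>
          rw [pvElemB.eq_def]
          simp [pvFlatE, hx.2, pvRenderE, PySem.List.slice_to_neg_one]
      · intro R depth s
        simp only [pvFlatE, List.cons_append]
        rw [pvLoopA.eq_def]
        simp only [ho.1, ho.2, hx.2, List.headD_cons, Bool.false_eq_true, and_false,
          if_neg, not_false_eq_true, List.drop_succ_cons, List.drop_zero,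
          ]
        rw [pvSep_cons_closing hc.2]
        simp [pvRenderE, PySem.List.slice_to_neg_one, List.append_assoc]
    | node o f c =>
      obtain ⟨ho, hf, hc⟩ : pvOpenTok o ∧ pvOkF f ∧ pvCloseTok c := hok
      have hlenE : (pvFlatE (.node o f c)).length = (pvFlatF f).length + 2 := by
        simp [pvFlatE]
      have hflt : (pvFlatF f).length < n := by omega
      have hforest := (IH (pvFlatF f).length hflt).2 f hf le_rfl
      constructor
      · intro R depth fuel hfuel
        rw [hlenE] at hfuel
        match fuel with
        | fuel + 1 =>
          rw [pvElemB.eq_def]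
          simp only [pvFlatE, List.cons_append, List.append_assoc,
            List.nil_append, List.headD_cons, List.drop_succ_cons, List.drop_zero]
          rw [pvHead_tag hf hc]
          have hB := hforest.1 (c :: R) (depth + 1) fuel
            (Or.inr (by simpa using hc.2)) (by omega)
          rw [hB]
          by_cases hrf : pvRenderF f (depth + 1) = [] <;>
            simp [pvRenderE, PySem.List.slice_to_neg_one, hrf, List.append_assoc]
      · intro R depth s
        simp only [pvFlatE, List.cons_append, List.append_assoc,
          List.nil_append]
        rw [pvLoopA_cons]
        rw [if_neg (by simp [ho.2]), if_pos ⟨by simp, ho.1, pvHead_tag hf hc⟩,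
          if_pos (by simp [ho.2])]
        rw [pvSep_cons_open ho.2]
        rw [hforest.2 (c :: R) (depth + 1) _ (Or.inr (by simpa using hc.2))]
        rw [pvLoopA_cons]
        rw [if_pos hc.2]
        rw [pvSep_cons_closing hc.2]
        have hd : depth + 1 - 1 = depth := by omega
        rw [hd]
        congr 1
        simp only [pvRenderE, pvBodyF, PySem.List.slice_to_neg_one]
        by_cases hrf : pvRenderF f (depth + 1) = [] <;>
          simp [hrf, List.append_assoc]
  refine ⟨helem, ?_⟩
  intro f hok hlen
  cases f with
  | nil =>
    constructor
    · intro R depth fuel hgood hfuel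
      match R with
      | [] => rw [pvForestB.eq_def]; simp [pvRenderF, pvFlatF]
      | t :: rest =>
        match fuel with
        | fuel + 1 =>
          rcases hgood with h | h
          · cases h
          · simp only [List.headD_cons] at h
            rw [pvForestB.eq_def]
            simp [pvFlatF, pvRenderF, h]
    · intro R depth s hgood
      simp [pvFlatF, pvBodyF, pvRenderF]
  | cons e f' =>
    obtain ⟨he, hf'⟩ : pvOkE e ∧ pvOkF f' := hok
    have hlE := pvFlatE_length e
    have hlenF : (pvFlatF (.cons e f')).length = (pvFlatE e).length + (pvFlatF f').length := by
      simp [pvFlatF]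
    have helemE := helem e he (by rw [hlenF] at hlen; omega)
    have hf'lt : (pvFlatF f').length < n := by rw [hlenF] at hlen; omega
    have hforest' := (IH (pvFlatF f').length hf'lt).2 f' hf' le_rfl
    obtain ⟨o, l, heqE, hoE⟩ := pvFlatE_cons_open e he
    constructor
    · intro R depth fuel hgood hfuel
      rw [hlenF] at hfuel
      match fuel with
      | fuel + 1 =>
        rw [pvForestB.eq_def]
        simp only [pvFlatF, List.append_assoc, heqE, List.cons_append]
        rw [if_neg (by simp [hoE.2])]
        have hB1 := helemE.1 (pvFlatF f' ++ R) depth (fuel + 1) (by omega)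
        simp only [heqE, List.cons_append] at hB1
        rw [hB1]
        have hB2 := hforest'.1 R depth fuel hgood (by omega)
        rw [hB2]
        simp [pvRenderF]
    · intro R depth s hgood
      simp only [pvFlatF, List.append_assoc]
      rw [helemE.2 (pvFlatF f' ++ R) depth s]
      rw [hforest'.2 R depth _ hgood]
      congr 1
      cases f' with
      | nil =>
        simp only [pvFlatF, List.nil_append]
        rw [pvSepR_good hgood]
        simp [pvBodyF, pvRenderF, PySem.Chars.join_singleton, List.append_assoc]
      | cons e2 f2 =>
        have hok2 : pvOkE e2 ∧ pvOkF f2 := hf'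
        obtain ⟨o2, l2, heqE2, hoE2⟩ := pvFlatE_cons_open e2 hok2.1
        have hsep : pvSepR (pvFlatF (.cons e2 f2) ++ R) = [',', '\n'] := by
          simp only [pvFlatF, heqE2, List.cons_append, List.append_assoc]
          exact pvSepR_open_cons hoE2.2
        rw [hsep]
        have hjoin := PySem.Chars.join_cons_cons [',', '\n'] (pvRenderE e depth)
          (pvRenderE e2 depth) (pvRenderF f2 depth)
        simp only [pvBodyF, pvRenderF]
        simp [hjoin, List.append_assoc]

-- ===== VERDICT (by name: the statement is the Claim_ definition above) =====
theorem parse_xml_to_json_spec : Claim_equal_parse_xml_to_json := by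
  intro xml _hdom hpre
  unfold Spec_parse_xml_to_json
  unfold Pre_parse_xml_to_json at hpre
  obtain ⟨f, rest, hok, heq, hrest⟩ :=
    pvCheck_parses (pvTokens xml).length (pvTokens xml) le_rfl 0 hpre
  rw [if_pos rfl] at hrest
  subst hrest
  rw [List.append_nil] at heq
  have hA := ((pvMain (pvFlatF f).length).2 f hok le_rfl).2 [] 1 ['{', '\n'] (Or.inl rfl)
  have hB := ((pvMain (pvFlatF f).length).2 f hok le_rfl).1 [] 1
    ((pvFlatF f).length + 1) (Or.inl rfl) (by omega)
  rw [List.append_nil] at hA hB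
  simp only [parse_xml_to_json, parse_xml_to_json_alt, heq, hA, hB]
  rw [pvLoopA.eq_def]
  by_cases hrf : pvRenderF f 1 = [] <;> simp [pvBodyF, hrf, List.append_assoc]
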